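-- pv_equiv track=rewrite | github.com/MaximKiryakin/MSU_ML | Pandas & Numpy & Matplotlib/functions.py | are_multisets_equal
-- ===== SOURCE A (Python) =====
-- from typing import List
--
-- def are_multisets_equal(x: List[int], y: List[int]) -> bool:
--     """
--     Проверить, задают ли два вектора одно и то же мультимножество.
--     """
--     y1, x1 = y[:], x[:]
--     for elem in x1:
--         if elem in y1:
--             y1.remove(elem)
--         else:
--             return False
--
--     return not y1
-- ===== SOURCE B (Python) =====
-- def are_multisets_equal(x, y):
--     return sorted(x) == sorted(y)
-- ===== Notes on version B (the rewrite author's own statement) =====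
-- stated objective: idiomatic
-- what changed: Replaced the element-by-element membership-test-and-remove scan over a mutable copy with sorting both lists once and comparing the sorted copies.
import Mathlib
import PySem

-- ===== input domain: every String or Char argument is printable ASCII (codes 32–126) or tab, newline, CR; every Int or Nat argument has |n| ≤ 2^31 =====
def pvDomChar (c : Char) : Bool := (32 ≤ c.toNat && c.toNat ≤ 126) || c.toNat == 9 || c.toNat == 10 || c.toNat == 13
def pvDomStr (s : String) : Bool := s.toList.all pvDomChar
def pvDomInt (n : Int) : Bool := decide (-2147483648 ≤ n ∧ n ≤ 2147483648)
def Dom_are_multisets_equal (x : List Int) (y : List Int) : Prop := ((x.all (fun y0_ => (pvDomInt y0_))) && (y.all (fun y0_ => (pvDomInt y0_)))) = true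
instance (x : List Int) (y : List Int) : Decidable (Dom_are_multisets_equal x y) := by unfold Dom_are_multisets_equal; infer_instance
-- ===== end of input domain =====

-- B (sorted(x) == sorted(y)) replaces A's membership-and-remove scan; equivalence of the return values is proved below.

-- ===== PORT A =====
-- the for-loop over x1 with the mutable copy y1: early 'return False', else remove elem from y1
def amLoopA : List Int → List Int → Bool
  | [], y1 => y1.isEmpty          -- 'return not y1'
  | elem :: rest, y1 =>
      if y1.contains elem then
        match PySem.List.remove? y1 elem with
        | some y2 => amLoopA rest y2
        | none => false           -- unreachable: elem ∈ y1
      else false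

def are_multisets_equal (x : List Int) (y : List Int) : Bool := amLoopA x y

-- ===== PORT B =====
def are_multisets_equal_alt (x : List Int) (y : List Int) : Bool :=
  decide (PySem.List.sorted x (fun v => v) false = PySem.List.sorted y (fun v => v) false)

-- ===== PRECONDITION & SPEC =====
def Spec_are_multisets_equal (x : List Int) (y : List Int) (out : Bool) : Prop := out = are_multisets_equal_alt x y
instance (x : List Int) (y : List Int) (out : Bool) : Decidable (Spec_are_multisets_equal x y out) := by unfold Spec_are_multisets_equal; infer_instance

-- ===== CLAIM (what is proved, stated in full; the proofs are below) =====
def Claim_equal_are_multisets_equal : Prop := ∀ (x : List Int) (y : List Int), Dom_are_multisets_equal x y → Spec_are_multisets_equal x y (are_multisets_equal x y)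

-- ===== LEMMAS AND PROOFS =====

theorem amLoopA_eq_true_iff_perm (x : List Int) : ∀ y : List Int, amLoopA x y = true ↔ x.Perm y := by
  induction x with
  | nil =>
      intro y
      rw [amLoopA]
      constructor
      · intro h; rw [List.isEmpty_iff] at h; subst h; exact .nil
      · intro h; rw [List.isEmpty_iff]; exact List.nil_perm.mp h
  | cons e rest ih =>
      intro y
      by_cases he : e ∈ y
      · rw [amLoopA, if_pos (List.elem_eq_true_of_mem he), PySem.List.remove?_eq_some_erase y e he]
        rw [ih, List.cons_perm_iff_perm_erase, and_iff_right he]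
      · rw [amLoopA, if_neg (by simp [he])]
        simp only [Bool.false_eq_true, false_iff]
        intro h
        exact he (h.mem_iff.mp List.mem_cons_self)

theorem ports_agree (x y : List Int) : are_multisets_equal x y = are_multisets_equal_alt x y := by
  unfold are_multisets_equal are_multisets_equal_alt
  rw [show (decide (PySem.List.sorted x (fun v => v) false = PySem.List.sorted y (fun v => v) false))
        = decide (x.Perm y) from by
        congr 1
        exact propext (PySem.List.sorted_id_eq_sorted_id_iff_perm x y)]
  by_cases h : x.Perm y
  · simp [h, (amLoopA_eq_true_iff_perm x y).mpr h]
  · simp only [decide_eq_false h]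
    rw [Bool.eq_false_iff]
    intro hc
    exact h ((amLoopA_eq_true_iff_perm x y).mp hc)

-- ===== VERDICT (by name: the statement is the Claim_ definition above) =====
theorem are_multisets_equal_spec : Claim_equal_are_multisets_equal := by
  intro x y _
  exact ports_agree x y
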